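-- pv_equiv track=rewrite | github.com/httppsdouq29/TT_ATTT | bai22.py | result
-- ===== SOURCE A (Python) =====
-- import math
--
-- def is_prime(a):
--     if a <= 1:
--         return False
--     for i in range(2, int(math.sqrt(a)) + 1):
--         if a % i == 0:
--             return False
--     return True
--
-- def result(number_a, number_b):
--     sum = 0
--     for i in range(number_a, number_b):
--         if is_prime(i):
--             Fi = i
--         else:
--             Fi = 0
--         for j in range(i + 1 , number_b + 1):
--             if is_prime(j):
--                 Fj = j
--             else:
--                 Fj = 0
--             sum += (Fi + Fj)
--     return sum
-- ===== SOURCE B (Python) =====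
-- import math
--
-- def result(number_a, number_b):
--     # Each F(k) for k in [a, b] appears in exactly (b - a) ordered pairs,
--     # so the double sum collapses to (b - a) * sum of F over [a, b].
--     total = 0
--     for k in range(number_a, number_b + 1):
--         if k >= 2 and all(k % d != 0 for d in range(2, math.isqrt(k) + 1)):
--             total += k
--     return (number_b - number_a) * total
-- ===== Notes on version B (the rewrite author's own statement) =====
-- stated objective: alternative
-- what changed: Replaced the double loop over ordered pairs by the closed form (b-a) * (sum of prime values in [a,b]), computed in one pass, since every F(k) occurs in exactly b-a ordered pairs.
import Mathlib
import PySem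

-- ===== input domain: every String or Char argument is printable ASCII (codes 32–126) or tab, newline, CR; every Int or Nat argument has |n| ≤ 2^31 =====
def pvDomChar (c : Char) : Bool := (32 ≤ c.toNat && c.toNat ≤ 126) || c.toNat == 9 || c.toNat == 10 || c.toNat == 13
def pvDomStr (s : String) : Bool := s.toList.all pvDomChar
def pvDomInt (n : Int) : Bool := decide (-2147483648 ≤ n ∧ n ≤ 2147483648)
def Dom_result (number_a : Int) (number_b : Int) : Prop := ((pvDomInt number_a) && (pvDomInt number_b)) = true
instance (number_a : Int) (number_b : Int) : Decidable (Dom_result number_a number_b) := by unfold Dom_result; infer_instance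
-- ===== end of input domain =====

-- B replaces A's double loop over ordered pairs by the closed form
-- (b - a) * (sum of F over [a, b]) computed in one pass (objective: alternative).

-- ===== PORT A =====
-- is_prime: trial division up to int(math.sqrt(a)); exact as Nat.sqrt on |a| ≤ 2^31
-- (for 2 ≤ a ≤ 2^31 the double sqrt rounds to isqrt(a) after int()).
def isPrimeA (a : Int) : Bool :=
  if a ≤ 1 then false
  else !((PySem.List.pyRange 2 ((Nat.sqrt a.toNat : Int) + 1) 1).any
          (fun i => PySem.Int.mod a i == 0))

def result (number_a : Int) (number_b : Int) : Int :=
  (PySem.List.pyRange number_a number_b 1).foldl (fun sum i =>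
    let Fi := if isPrimeA i then i else 0
    (PySem.List.pyRange (i + 1) (number_b + 1) 1).foldl (fun sum j =>
      let Fj := if isPrimeA j then j else 0
      sum + (Fi + Fj)) sum) 0

-- ===== PORT B =====
-- k >= 2 and all(k % d != 0 for d in range(2, math.isqrt(k) + 1))
def isPrimeB (k : Int) : Bool :=
  decide (2 ≤ k) && (PySem.List.pyRange 2 ((Nat.sqrt k.toNat : Int) + 1) 1).all
    (fun d => PySem.Int.mod k d != 0)

def result_alt (number_a : Int) (number_b : Int) : Int :=
  let total := (PySem.List.pyRange number_a (number_b + 1) 1).foldl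
    (fun total k => if isPrimeB k then total + k else total) 0
  (number_b - number_a) * total

-- ===== PRECONDITION & SPEC =====
def Spec_result (number_a : Int) (number_b : Int) (out : Int) : Prop := out = result_alt number_a number_b
instance (number_a : Int) (number_b : Int) (out : Int) : Decidable (Spec_result number_a number_b out) := by unfold Spec_result; infer_instance

-- ===== CLAIM (what is proved, stated in full; the proofs are below) =====
def Claim_equal_result : Prop := ∀ (number_a : Int) (number_b : Int), Dom_result number_a number_b → Spec_result number_a number_b (result number_a number_b)

-- ===== LEMMAS AND PROOFS =====

-- F(x) = x if prime else 0, stated with A's predicate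
def pvF (x : Int) : Int := if isPrimeA x then x else 0

-- sum of F over range(lo, hi)
def pvS (lo hi : Int) : Int := ((PySem.List.pyRange lo hi 1).map pvF).sum

theorem isPrime_eq (k : Int) : isPrimeB k = isPrimeA k := by
  unfold isPrimeA isPrimeB
  by_cases h : k ≤ 1
  · simp [h, show ¬ (2 ≤ k) by omega]
  · simp only [h, if_false, show 2 ≤ k by omega, decide_true, Bool.true_and]
    rw [List.all_eq_not_any_not]
    simp [bne]

theorem pvS_cons (lo hi : Int) (h : lo < hi) :
    pvS lo hi = pvF lo + pvS (lo + 1) hi := by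
  unfold pvS
  rw [PySem.List.pyRange_one_cons h]
  simp

theorem pvS_nil (lo hi : Int) (h : hi ≤ lo) : pvS lo hi = 0 := by
  unfold pvS
  rw [PySem.List.pyRange_one_eq_nil h]
  simp

-- inner loop of A: for j in range(i+1, b+1): sum += Fi + Fj
theorem inner_eq (b i s : Int) (hi : i < b) :
    (PySem.List.pyRange (i + 1) (b + 1) 1).foldl
      (fun sum j => sum + (pvF i + pvF j)) s
    = s + ((b - i) * pvF i + pvS (i + 1) (b + 1)) := by
  rw [PySem.List.foldl_add (g := fun j => pvF i + pvF j)]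
  have hlen : ((PySem.List.pyRange (i+1) (b+1) 1).length : Int) = b - i := by
    rw [PySem.List.length_pyRange_one]; omega
  calc s + ((PySem.List.pyRange (i+1) (b+1) 1).map (fun j => pvF i + pvF j)).sum
      = s + (((PySem.List.pyRange (i+1) (b+1) 1).length : Int) * pvF i
          + ((PySem.List.pyRange (i+1) (b+1) 1).map pvF).sum) := by
        congr 1
        induction (PySem.List.pyRange (i+1) (b+1) 1) with
        | nil => simp
        | cons x xs ih => simp [ih]; ring
    _ = s + ((b - i) * pvF i + pvS (i + 1) (b + 1)) := by
        rw [hlen]; simp [pvS]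

-- outer sum collapses: Σ_{i∈[a,b)} ((b-i)*F i + S(i+1,b+1)) = (b-a) * S(a,b+1)
theorem outer_sum_aux (b : Int) (n : Nat) : ∀ a : Int, (b - a).toNat = n → a < b →
    ((PySem.List.pyRange a b 1).map (fun i => (b - i) * pvF i + pvS (i + 1) (b + 1))).sum
      = (b - a) * pvS a (b + 1) := by
  induction n with
  | zero => intro a hn hab; omega
  | succ m ih =>
    intro a hn hab
    rw [PySem.List.pyRange_one_cons hab]
    simp only [List.map_cons, List.sum_cons]
    have hS : pvS a (b + 1) = pvF a + pvS (a + 1) (b + 1) := pvS_cons a (b+1) (by omega)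
    by_cases h2 : a + 1 < b
    · rw [ih (a + 1) (by omega) h2, hS]; ring
    · have hab2 : b ≤ a + 1 := by omega
      rw [PySem.List.pyRange_one_eq_nil hab2]
      rw [hS, show b - a = 1 by omega]
      simp

theorem outer_sum (a b : Int) :
    ((PySem.List.pyRange a b 1).map (fun i => (b - i) * pvF i + pvS (i + 1) (b + 1))).sum
      = (b - a) * pvS a (b + 1) := by
  by_cases hab : b ≤ a
  · rw [PySem.List.pyRange_one_eq_nil hab]
    by_cases h : a = b
    · subst h; simp
    · rw [pvS_nil a (b+1) (by omega)]; simp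
  · exact outer_sum_aux b (b - a).toNat a rfl (by omega)

theorem result_eq (a b : Int) : result a b = (b - a) * pvS a (b + 1) := by
  unfold result
  refine Eq.trans (PySem.List.foldl_congr_mem
      (g := fun s i => s + ((b - i) * pvF i + pvS (i + 1) (b + 1))) _ _ _ ?_) ?_
  · intro acc x hx
    have hx' := (PySem.List.mem_pyRange_one).1 hx
    exact inner_eq b x acc hx'.2
  · rw [PySem.List.foldl_add (g := fun i => (b - i) * pvF i + pvS (i + 1) (b + 1)),
        outer_sum]
    ring

theorem result_alt_eq (a b : Int) : result_alt a b = (b - a) * pvS a (b + 1) := by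
  unfold result_alt
  simp only []
  congr 1
  refine Eq.trans (PySem.List.foldl_congr_mem (g := fun t k => t + pvF k) _ _ _ ?_) ?_
  · intro acc x _
    rw [isPrime_eq]; unfold pvF; by_cases hp : isPrimeA x <;> simp [hp]
  · rw [PySem.List.foldl_add (g := pvF)]
    unfold pvS; ring

-- ===== VERDICT (by name: the statement is the Claim_ definition above) =====
theorem result_spec : Claim_equal_result := by
  intro a b _
  unfold Spec_result
  rw [result_eq, result_alt_eq]
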